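-- pv_equiv track=rewrite | github.com/Mgeyre12/poneglyph | query/ask.py | _format_arc_lookup
-- ===== SOURCE A (Python) =====
-- def _format_arc_lookup(arc_map: dict[int, str] | None) -> str:
--     header = "Chapter → Arc lookup (for `[[Ch.NNN|Arc Name]]` citations):"
--     if not arc_map:
--         return header + "\n(empty — omit all citations)"
--     by_arc: dict[str, list[int]] = {}
--     for num, arc in arc_map.items():
--         by_arc.setdefault(arc, []).append(num)
--     lines = [
--         f"  {arc}: {', '.join(str(n) for n in sorted(nums))}"
--         for arc, nums in sorted(by_arc.items())
--     ]
--     return header + "\n" + "\n".join(lines)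
-- ===== SOURCE B (Python) =====
-- from itertools import groupby
--
--
-- def _format_arc_lookup(arc_map):
--     header = "Chapter → Arc lookup (for `[[Ch.NNN|Arc Name]]` citations):"
--     if not arc_map:
--         return header + "\n(empty — omit all citations)"
--     pairs = sorted(arc_map.items(), key=lambda kv: (kv[1], kv[0]))
--     lines = [
--         "  {}: {}".format(arc, ", ".join(str(num) for num, _ in grp))
--         for arc, grp in groupby(pairs, key=lambda kv: kv[1])
--     ]
--     return header + "\n" + "\n".join(lines)
-- ===== Notes on version B (the rewrite author's own statement) =====
-- stated objective: alternative
-- what changed: Replaced the dict-of-lists grouping with separate sorts of the dict items and of each bucket by a single sort of the items keyed by (arc, number) followed by itertools.groupby on the arc, emitting one line per run.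
import Mathlib
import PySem

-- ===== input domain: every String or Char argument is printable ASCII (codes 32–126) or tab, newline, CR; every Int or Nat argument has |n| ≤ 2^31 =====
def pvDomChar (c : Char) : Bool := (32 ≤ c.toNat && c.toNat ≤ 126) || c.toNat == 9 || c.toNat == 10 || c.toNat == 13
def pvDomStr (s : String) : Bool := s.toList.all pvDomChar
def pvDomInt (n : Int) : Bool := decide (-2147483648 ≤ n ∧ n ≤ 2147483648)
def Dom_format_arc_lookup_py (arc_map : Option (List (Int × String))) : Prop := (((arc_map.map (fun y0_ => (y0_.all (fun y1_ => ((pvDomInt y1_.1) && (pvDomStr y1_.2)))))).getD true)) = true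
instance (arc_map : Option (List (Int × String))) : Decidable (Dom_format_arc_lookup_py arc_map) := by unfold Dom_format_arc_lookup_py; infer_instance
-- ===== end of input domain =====

-- B replaces A's dict-of-lists grouping (plus separate sorts of the dict items and of each
-- bucket) by ONE sort of the chapter→arc items keyed by (arc, number) followed by a
-- consecutive-run grouping on the arc (itertools.groupby); same return value (alternative decomposition).

-- ===== PORT A =====
def format_arc_lookup_py (arc_map : Option (List (Int × String))) : String :=
  let header := "Chapter → Arc lookup (for `[[Ch.NNN|Arc Name]]` citations):"
  match arc_map with
  | none => header ++ "\n(empty — omit all citations)"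
  | some l =>
    if l.isEmpty then header ++ "\n(empty — omit all citations)"
    else
      -- arc_map.items(): the dict denoted by the association list (insertion order, last value wins)
      let items := (PySem.Dict.ofList l).items
      -- by_arc.setdefault(arc, []).append(num)  ≡  by_arc[arc] = by_arc.get(arc, []) + [num]
      let byArc := items.foldl (fun d p => d.modify p.2 [] (fun ns => ns ++ [p.1])) PySem.Dict.empty
      -- sorted(by_arc.items()): tuples compared lexicographically (arc, then num-list)
      let lines := (PySem.List.sorted2 byArc.items (fun kv => kv.1) (fun kv => kv.2)).map
        (fun kv => "  " ++ kv.1 ++ ": " ++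
          PySem.Str.join ", " ((PySem.List.sorted kv.2 (fun n => n)).map PySem.Int.toStr))
      header ++ "\n" ++ PySem.Str.join "\n" lines

-- ===== PORT B =====
-- itertools.groupby(pairs, key=lambda kv: kv[1]) restricted to what B consumes:
-- consecutive runs of equal arc, each run with its list of chapter numbers
def pvGroupRuns : List (Int × String) → List (String × List Int)
  | [] => []
  | (n, a) :: rest =>
    match pvGroupRuns rest with
    | [] => [(a, [n])]
    | (a', ns) :: gs => if a = a' then (a, n :: ns) :: gs else (a, [n]) :: (a', ns) :: gs

def format_arc_lookup_py_alt (arc_map : Option (List (Int × String))) : String :=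
  let header := "Chapter → Arc lookup (for `[[Ch.NNN|Arc Name]]` citations):"
  match arc_map with
  | none => header ++ "\n(empty — omit all citations)"
  | some l =>
    if l.isEmpty then header ++ "\n(empty — omit all citations)"
    else
      -- sorted(arc_map.items(), key=lambda kv: (kv[1], kv[0]))
      let pairs := PySem.List.sorted2 (PySem.Dict.ofList l).items (fun kv => kv.2) (fun kv => kv.1)
      let lines := (pvGroupRuns pairs).map
        (fun g => "  " ++ g.1 ++ ": " ++ PySem.Str.join ", " (g.2.map PySem.Int.toStr))
      header ++ "\n" ++ PySem.Str.join "\n" lines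

-- ===== PRECONDITION & SPEC =====
def Spec_format_arc_lookup_py (arc_map : Option (List (Int × String))) (out : String) : Prop := out = format_arc_lookup_py_alt arc_map
instance (arc_map : Option (List (Int × String))) (out : String) : Decidable (Spec_format_arc_lookup_py arc_map out) := by unfold Spec_format_arc_lookup_py; infer_instance

-- ===== CLAIM (what is proved, stated in full; the proofs are below) =====
def Claim_equal_format_arc_lookup_py : Prop := ∀ (arc_map : Option (List (Int × String))), Dom_format_arc_lookup_py arc_map → Spec_format_arc_lookup_py arc_map (format_arc_lookup_py arc_map)

-- ===== LEMMAS AND PROOFS =====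


theorem pvInsertBy_congr {α : Type} (f g : α → α → Bool) (x : α) :
    ∀ ys : List α, (∀ y ∈ ys, f x y = g x y) → PySem.List.insertBy f x ys = PySem.List.insertBy g x ys := by
  intro ys
  induction ys with
  | nil => intro; rfl
  | cons y ys ih =>
    intro h
    simp only [PySem.List.insertBy]
    rw [h y (by simp)]
    split
    · rfl
    · rw [ih (fun z hz => h z (by simp [hz]))]

theorem pvFoldl_insertBy_congr {α : Type} (f g : α → α → Bool) (S : α → Prop)
    (hfg : ∀ a b, S a → S b → f a b = g a b) :
    ∀ (xs acc : List α), (∀ x ∈ xs, S x) → (∀ x ∈ acc, S x) →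
      xs.foldl (fun acc x => PySem.List.insertBy f x acc) acc
        = xs.foldl (fun acc x => PySem.List.insertBy g x acc) acc := by
  intro xs
  induction xs with
  | nil => intros; rfl
  | cons x xs ih =>
    intro acc hxs hacc
    simp only [List.foldl_cons]
    rw [pvInsertBy_congr f g x acc (fun y hy => hfg x y (hxs x (by simp)) (hacc y hy)), ih]
    · intro z hz; exact hxs z (by simp [hz])
    · intro z hz
      rcases (PySem.List.mem_insertBy g x z acc).1 hz with h | h
      · subst h; exact hxs z (by simp)
      · exact hacc z h

theorem pvSorted2_eq_sorted_lex {α κ₁ κ₂ : Type} [LinearOrder κ₁] [LinearOrder κ₂]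
    (xs : List α) (k1 : α → κ₁) (k2 : α → κ₂) :
    PySem.List.sorted2 xs k1 k2 = PySem.List.sorted xs (fun x => toLex (k1 x, k2 x)) := by
  unfold PySem.List.sorted2 PySem.List.sorted
  simp only [if_neg (by decide : ¬ (false = true))]
  apply pvFoldl_insertBy_congr _ _ (fun _ => True)
  · intro a b _ _
    rcases lt_trichotomy (k1 a) (k1 b) with h | h | h
    · simp [Prod.Lex.lt_iff, h]
    · simp [Prod.Lex.lt_iff, h]
    · simp [Prod.Lex.lt_iff, h, h.ne', not_lt.2 h.le]
  · simp
  · simp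

theorem pvFlatMap_congr_mem {α β : Type} (f g : α → List β) :
    ∀ l : List α, (∀ x ∈ l, f x = g x) → l.flatMap f = l.flatMap g := by
  intro l
  induction l with
  | nil => intro; rfl
  | cons x l ih =>
    intro h
    simp only [List.flatMap_cons, h x (by simp), ih (fun z hz => h z (by simp [hz]))]

theorem pvPairwise_flatMap {α β : Type} (R : α → α → Prop) (f : β → List α) :
    ∀ l : List β, (∀ b ∈ l, (f b).Pairwise R) →
      l.Pairwise (fun b c => ∀ x ∈ f b, ∀ y ∈ f c, R x y) → (l.flatMap f).Pairwise R := by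
  intro l
  induction l with
  | nil => intros; simp
  | cons b l ih =>
    intro hall hpw
    simp only [List.flatMap_cons]
    rw [List.pairwise_append]
    refine ⟨hall b (by simp), ih (fun c hc => hall c (by simp [hc])) (List.pairwise_cons.1 hpw).2, ?_⟩
    intro x hx y hy
    rcases List.mem_flatMap.1 hy with ⟨c, hc, hyc⟩
    exact (List.pairwise_cons.1 hpw).1 c hc x hx y hyc

theorem pvFlatMap_filter_cons {α κ : Type} [BEq κ] [LawfulBEq κ] (key : α → κ) (x : α) (rest : List α) :
    ∀ ks : List κ, ks.Nodup → key x ∈ ks →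
      (ks.flatMap (fun k => (x :: rest).filter (fun y => key y == k))).Perm
        (x :: ks.flatMap (fun k => rest.filter (fun y => key y == k))) := by
  intro ks
  induction ks with
  | nil => intro _ h; simp at h
  | cons k0 ks ih =>
    intro hnd hmem
    rw [List.flatMap_cons, List.flatMap_cons]
    by_cases hk : key x = k0
    · have hnot : ∀ k ∈ ks, (x :: rest).filter (fun y => key y == k) = rest.filter (fun y => key y == k) := by
        intro k hkks
        have hk0 : k0 ≠ k := fun he => (List.nodup_cons.1 hnd).1 (he.symm ▸ hkks)
        have hxk : key x ≠ k := by rw [hk]; exact hk0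
        simp [hxk]
      have h0 : (x :: rest).filter (fun y => key y == k0) = x :: rest.filter (fun y => key y == k0) := by
        simp [hk]
      rw [h0, pvFlatMap_congr_mem _ _ ks hnot]
      simp
    · have hmem' : key x ∈ ks := by
        rcases List.mem_cons.1 hmem with h | h
        · exact absurd h hk
        · exact h
      have h0 : (x :: rest).filter (fun y => key y == k0) = rest.filter (fun y => key y == k0) := by
        simp [hk]
      rw [h0]
      exact (List.Perm.append_left _ (ih (List.nodup_cons.1 hnd).2 hmem')).trans List.perm_middle

theorem pvPerm_flatMap_filter {α κ : Type} [BEq κ] [LawfulBEq κ] (key : α → κ) (ks : List κ)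
    (hnd : ks.Nodup) :
    ∀ xs : List α, (∀ x ∈ xs, key x ∈ ks) →
      (ks.flatMap (fun k => xs.filter (fun y => key y == k))).Perm xs := by
  intro xs
  induction xs with
  | nil => intro; simp
  | cons x rest ih =>
    intro h
    exact (pvFlatMap_filter_cons key x rest ks hnd (h x (by simp))).trans
      (List.Perm.cons x (ih (fun z hz => h z (by simp [hz]))))


theorem pvGroupRuns_block (a : String) :
    ∀ ns : List Int, ns ≠ [] → ∀ tail : List (Int × String),
      (∀ b ns' gs, pvGroupRuns tail = (b, ns') :: gs → b ≠ a) →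
      pvGroupRuns (ns.map (fun n => (n, a)) ++ tail) = (a, ns) :: pvGroupRuns tail := by
  intro ns
  induction ns with
  | nil => intro h; exact absurd rfl h
  | cons n ns ih =>
    intro _ tail htail
    cases ns with
    | nil =>
      show pvGroupRuns ((n, a) :: tail) = (a, [n]) :: pvGroupRuns tail
      simp only [pvGroupRuns]
      cases hg : pvGroupRuns tail with
      | nil => rfl
      | cons g gs =>
        obtain ⟨b, ns'⟩ := g
        have hne : ¬ (a = b) := fun he => htail b ns' gs hg (Eq.symm he)
        simp [hne]
    | cons n' ns' =>
      have ihh := ih (by simp) tail htail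
      simp only [List.map_cons, List.cons_append, pvGroupRuns] at *
      rw [ihh]
      simp

theorem pvGroupRuns_flatMap (bucketF : String → List Int) :
    ∀ arcs : List String, (∀ a ∈ arcs, bucketF a ≠ []) → arcs.Pairwise (· ≠ ·) →
      pvGroupRuns (arcs.flatMap (fun a => (bucketF a).map (fun n => (n, a))))
        = arcs.map (fun a => (a, bucketF a)) := by
  intro arcs
  induction arcs with
  | nil => intros; rfl
  | cons a arcs ih =>
    intro hne hpw
    have ihh := ih (fun c hc => hne c (by simp [hc])) (List.pairwise_cons.1 hpw).2
    rw [List.flatMap_cons]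
    rw [pvGroupRuns_block a (bucketF a) (hne a (by simp)) _ ?_, ihh, List.map_cons]
    intro b ns' gs hg hba
    rw [ihh] at hg
    cases arcs with
    | nil => simp at hg
    | cons c arcs' =>
      simp only [List.map_cons, List.cons.injEq, Prod.mk.injEq] at hg
      have : a ≠ c := (List.pairwise_cons.1 hpw).1 c (by simp)
      exact this (hba ▸ hg.1.1.symm)


-- a flatMap of pointwise-permuted blocks is a permutation
theorem pvFlatMap_perm {α β : Type} (f g : β → List α) :
    ∀ l : List β, (∀ x ∈ l, (f x).Perm (g x)) → (l.flatMap f).Perm (l.flatMap g) := by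
  intro l
  induction l with
  | nil => intro; simp
  | cons b l ih =>
    intro h
    simp only [List.flatMap_cons]
    exact (h b (by simp)).append (ih (fun z hz => h z (by simp [hz])))

-- the heart: both line lists are (sorted distinct arcs).map (arc, its sorted numbers)
theorem pvLines_eq (l : List (Int × String)) :
    (PySem.List.sorted2 ((PySem.Dict.ofList l).items.foldl
        (fun d p => d.modify p.2 [] (fun ns => ns ++ [p.1])) PySem.Dict.empty).items
        (fun kv => kv.1) (fun kv => kv.2)).map
      (fun kv => "  " ++ kv.1 ++ ": " ++
        PySem.Str.join ", " ((PySem.List.sorted kv.2 (fun n => n)).map PySem.Int.toStr))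
    = (pvGroupRuns (PySem.List.sorted2 (PySem.Dict.ofList l).items
        (fun kv => kv.2) (fun kv => kv.1))).map
      (fun g => "  " ++ g.1 ++ ": " ++ PySem.Str.join ", " (g.2.map PySem.Int.toStr)) := by
  set items := (PySem.Dict.ofList l).items with hitems
  have hnd1 : (items.map (fun p => p.1)).Nodup := by
    have := PySem.Dict.nodup_keys_ofList (ps := l)
    simpa [PySem.Dict.keys, hitems] using this
  set byArc := items.foldl (fun d p => d.modify p.2 [] (fun ns => ns ++ [p.1])) PySem.Dict.empty
    with hbyArc
  have hgetD : ∀ a, byArc.getD a []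
      = (items.filter (fun p => p.2 == a)).map (fun p => p.1) := by
    intro a
    have h1 : byArc = (items.map Prod.swap).foldl
        (fun d q => d.modify q.1 [] (fun ns => ns ++ [q.2])) PySem.Dict.empty := by
      rw [hbyArc, List.foldl_map]
      rfl
    rw [h1, PySem.Dict.getD_foldl_modify_append]
    simp only [List.filter_map, List.map_map]
    simp [Function.comp_def, Prod.fst_swap, Prod.snd_swap]
  have hbkeys : byArc.keys = PySem.Set.ofList (items.map (fun p => p.2)) := by
    rw [hbyArc, PySem.Dict.keys_foldl_modify_key items (fun p => p.2) []
      (fun _ p => fun ns => ns ++ [p.1])]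
    simp [PySem.Set.ofList_eq_foldl, PySem.Set.update, PySem.Dict.keys, PySem.Dict.empty]
  have hbnd : byArc.keys.Nodup := by
    rw [hbyArc]
    exact PySem.Dict.nodup_keys_foldl_modify_key _ _ _ _ _ (by simp [PySem.Dict.keys, PySem.Dict.empty])
  set arcs := PySem.List.sorted (PySem.Set.ofList (items.map (fun p => p.2))) (fun x => x)
    with harcs
  set bucketF : String → List Int := fun a =>
    PySem.List.sorted ((items.filter (fun p => p.2 == a)).map (fun p => p.1)) (fun n => n)
    with hbucket
  have harcslt : arcs.Pairwise (· < ·) := PySem.List.sorted_ofList_pairwise_lt _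
  have harcsnd : arcs.Nodup := harcslt.imp ne_of_lt
  have hbucknd : ∀ a, (bucketF a).Nodup := by
    intro a
    have hsub : ((items.filter (fun p => p.2 == a)).map (fun p => p.1)).Sublist
        (items.map fun p => p.1) :=
      List.Sublist.map (fun p : Int × String => p.1) List.filter_sublist
    exact ((PySem.List.sorted_perm _ _ _).symm.nodup (hnd1.sublist hsub))
  have hbucklt : ∀ a, (bucketF a).Pairwise (· < ·) := by
    intro a
    exact ((PySem.List.sorted_pairwise _ _).and (hbucknd a)).imp
      (fun h => lt_of_le_of_ne h.1 h.2)
  -- A side: sorted dict items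
  have hAitems : byArc.items = byArc.keys.map (fun a => (a, byArc.getD a [])) :=
    PySem.Dict.items_eq_map_keys byArc hbnd []
  have hbnd' : (byArc.items.map (fun p => p.1)).Nodup := by
    simpa [PySem.Dict.keys] using hbnd
  have hAsort1 : PySem.List.sorted2 byArc.items (fun kv => kv.1) (fun kv => kv.2)
      = PySem.List.sorted byArc.items (fun kv => kv.1) := by
    unfold PySem.List.sorted2 PySem.List.sorted
    apply pvFoldl_insertBy_congr _ _ (fun x => x ∈ byArc.items)
    · intro a b ha hb
      rcases lt_trichotomy a.1 b.1 with h | h | h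
      · simp [h]
      · have hab : a = b := List.inj_on_of_nodup_map hbnd' ha hb h
        subst hab
        simp [lt_self_iff_false]
      · simp [h, lt_asymm h]
    · simp
    · simp
  have hAsort : PySem.List.sorted2 byArc.items (fun kv => kv.1) (fun kv => kv.2)
      = arcs.map (fun a => (a, byArc.getD a [])) := by
    rw [hAsort1]
    apply PySem.List.sorted_eq_of_perm_of_pairwise_lt
    · rw [hAitems, hbkeys]
      exact (PySem.List.sorted_perm _ _ _).map _
    · rw [List.pairwise_map]
      exact harcslt
  -- B side: sorted items by (arc, num)
  have hmemarcs : ∀ p ∈ items, p.2 ∈ arcs := by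
    intro p hp
    rw [harcs, PySem.List.mem_sorted]
    exact (PySem.Set.mem_ofList _ _).2 (List.mem_map.2 ⟨p, hp, rfl⟩)
  have hBsort : PySem.List.sorted2 items (fun kv => kv.2) (fun kv => kv.1)
      = arcs.flatMap (fun a => (bucketF a).map (fun n => (n, a))) := by
    refine (pvSorted2_eq_sorted_lex items (fun kv => kv.2) (fun kv => kv.1)).trans ?_
    apply PySem.List.sorted_eq_of_perm_of_pairwise_lt
    · have h1 : ∀ a, ((bucketF a).map (fun n => (n, a))).Perm
          (items.filter (fun p => p.2 == a)) := by
        intro a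
        have hp := (PySem.List.sorted_perm
          ((items.filter (fun p => p.2 == a)).map (fun p => p.1)) (fun n => n) false).map
          (fun n => (n, a))
        have h2 : ((items.filter (fun p => p.2 == a)).map (fun p => p.1)).map
            (fun n => (n, a)) = items.filter (fun p => p.2 == a) := by
          rw [List.map_map]
          conv_rhs => rw [← List.map_id (items.filter (fun p => p.2 == a))]
          apply List.map_congr_left
          intro p hp2
          have : p.2 = a := by
            have := (List.mem_filter.1 hp2).2
            simpa using this
          cases p
          simp_all
        rw [hbucket]
        exact h2 ▸ hp
      have h3 := pvFlatMap_perm _ _ arcs (fun a _ => h1 a)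
      have h4 : (arcs.flatMap (fun a => items.filter (fun p => p.2 == a))).Perm items :=
        pvPerm_flatMap_filter (fun p => p.2) arcs harcsnd items hmemarcs
      exact h3.trans h4
    · apply pvPairwise_flatMap
      · intro a _
        rw [List.pairwise_map]
        refine List.Pairwise.imp ?_ (hbucklt a)
        intro n m h
        exact Prod.Lex.lt_iff.2 (Or.inr ⟨rfl, h⟩)
      · refine harcslt.imp ?_
        intro a b hab x hx y hy
        rcases List.mem_map.1 hx with ⟨n, _, rfl⟩
        rcases List.mem_map.1 hy with ⟨m, _, rfl⟩
        exact Prod.Lex.lt_iff.2 (Or.inl hab)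
  have hbuckne : ∀ a ∈ arcs, bucketF a ≠ [] := by
    intro a ha hnil
    rw [hbucket] at hnil
    rw [PySem.List.sorted_eq_nil_iff, List.map_eq_nil_iff, List.filter_eq_nil_iff] at hnil
    rw [harcs, PySem.List.mem_sorted] at ha
    rcases List.mem_map.1 ((PySem.Set.mem_ofList _ _).1 ha) with ⟨p, hp, rfl⟩
    exact hnil p hp (by simp)
  have hgroup : pvGroupRuns (arcs.flatMap (fun a => (bucketF a).map (fun n => (n, a))))
      = arcs.map (fun a => (a, bucketF a)) :=
    pvGroupRuns_flatMap bucketF arcs hbuckne (harcslt.imp ne_of_lt)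
  rw [hAsort, hBsort, hgroup, List.map_map, List.map_map]
  apply List.map_congr_left
  intro a _
  simp only [Function.comp]
  rw [hgetD a]

-- ===== VERDICT (by name: the statement is the Claim_ definition above) =====
theorem format_arc_lookup_py_spec : Claim_equal_format_arc_lookup_py := by
  intro arc_map _
  unfold Spec_format_arc_lookup_py format_arc_lookup_py format_arc_lookup_py_alt
  match arc_map with
  | none => rfl
  | some l =>
    by_cases h : l.isEmpty
    · simp only [h, if_true]
    · simp only [h]
      rw [pvLines_eq l]
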